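-- pv_equiv track=rewrite | github.com/pinellolab/CRISPResso2 | CRISPResso2/CRISPRessoShared.py | get_relative_coordinates
-- ===== SOURCE A (Python) =====
-- def get_relative_coordinates(to_sequence, from_sequence):
--     """Given an alignment, get the relative coordinates of the second sequence to the first.
--
--     For example, from_sequence[i] matches to to_sequence[inds[i]]. A `-1`
--     indicates a gap at the beginning of `to_sequence`.
--
--     Parameters
--     ----------
--     to_sequence : str
--         The alignment of the first sequence (where the coordinates are relative to)
--     from_sequence : str
--         The alignment of the second sequence
--
--     Returns
--     -------
--     s1inds_gap_left : list of int
--         The relative coordinates of the second sequence to the first, where gaps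
--         in the first sequence are filled with the left value.
--     s1inds_gap_right : list of int
--         The relative coordinates of the second sequence to the first, where gaps
--         in the first sequence are filled with the right value.
--     """
--     s1inds_gap_left = []
--     s1inds_gap_right = []
--     s1idx_left = -1
--     s1idx_right = 0
--     s2idx = -1
--     for ix in range(len(to_sequence)):
--         if to_sequence[ix] != "-":
--             s1idx_left += 1
--         if from_sequence[ix] != "-":
--             s2idx += 1
--             s1inds_gap_left.append(s1idx_left)
--             s1inds_gap_right.append(s1idx_right)
--         if to_sequence[ix] != "-":
--             s1idx_right += 1
--
--     return s1inds_gap_left, s1inds_gap_right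
-- ===== SOURCE B (Python) =====
-- def get_relative_coordinates(to_sequence, from_sequence):
--     # Two-phase version: build a per-column table of reference coordinates,
--     # then select the columns where from_sequence is not a gap.
--     lefts = []
--     rights = []
--     count = 0
--     for ix in range(len(to_sequence)):
--         if to_sequence[ix] != "-":
--             count += 1
--         left = count - 1
--         lefts.append(left)
--         rights.append(left if to_sequence[ix] != "-" else left + 1)
--     s1inds_gap_left = []
--     s1inds_gap_right = []
--     for ix in range(len(to_sequence)):
--         if from_sequence[ix] != "-":
--             s1inds_gap_left.append(lefts[ix])
--             s1inds_gap_right.append(rights[ix])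
--     return s1inds_gap_left, s1inds_gap_right
-- ===== Notes on version B (the rewrite author's own statement) =====
-- stated objective: alternative
-- what changed: Replaces the single fused loop carrying five pieces of running state with a two-phase decomposition: one pass builds a per-column table of left/right reference coordinates, a second pass selects the table entries at non-gap columns of from_sequence.
import Mathlib
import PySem

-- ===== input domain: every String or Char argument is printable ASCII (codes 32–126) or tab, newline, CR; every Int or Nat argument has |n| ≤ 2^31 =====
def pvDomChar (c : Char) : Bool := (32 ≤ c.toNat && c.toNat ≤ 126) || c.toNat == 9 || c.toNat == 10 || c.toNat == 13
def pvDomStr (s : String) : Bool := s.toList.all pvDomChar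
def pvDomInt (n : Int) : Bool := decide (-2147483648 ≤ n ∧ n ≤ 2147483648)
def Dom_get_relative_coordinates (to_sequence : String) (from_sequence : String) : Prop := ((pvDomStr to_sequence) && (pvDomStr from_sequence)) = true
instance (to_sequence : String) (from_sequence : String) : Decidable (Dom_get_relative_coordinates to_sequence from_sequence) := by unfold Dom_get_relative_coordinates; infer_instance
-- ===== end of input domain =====

-- B replaces A's single fused loop (five pieces of running state) by a two-phase
-- decomposition: a per-column coordinate table, then a filtered selection pass
-- (objective: alternative; same O(n) cost). Equivalence is proved on Pre_ (A raises
-- IndexError when from_sequence is shorter than to_sequence; so does B).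

-- ===== PORT A =====
-- one iteration of A's loop (pyGetD is exact here: Pre_ keeps every index in range)
def pvAStep (tl fl : List Char) (st : (List Int × List Int) × Int × Int × Int) (ix : Int) :
    (List Int × List Int) × Int × Int × Int :=
  let gl := st.1.1
  let gr := st.1.2
  let s1l := st.2.1
  let s1r := st.2.2.1
  let s2 := st.2.2.2
  let s1l := if PySem.List.pyGetD tl ix ' ' ≠ '-' then s1l + 1 else s1l
  let t := if PySem.List.pyGetD fl ix ' ' ≠ '-' then (s2 + 1, gl ++ [s1l], gr ++ [s1r]) else (s2, gl, gr)
  let s1r := if PySem.List.pyGetD tl ix ' ' ≠ '-' then s1r + 1 else s1r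
  ((t.2.1, t.2.2), s1l, s1r, t.1)

def get_relative_coordinates (to_sequence : String) (from_sequence : String) : List Int × List Int :=
  let tl := to_sequence.toList
  let fl := from_sequence.toList
  let st := (PySem.List.pyRange 0 (PySem.List.len tl) 1).foldl (pvAStep tl fl) (([], []), -1, 0, -1)
  (st.1.1, st.1.2)

-- ===== PORT B =====
-- phase 1: per-column table (lefts, rights, running non-gap count)
def pvBStep1 (tl : List Char) (st : List Int × List Int × Int) (ix : Int) :
    List Int × List Int × Int :=
  let count := if PySem.List.pyGetD tl ix ' ' ≠ '-' then st.2.2 + 1 else st.2.2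
  let left := count - 1
  (st.1 ++ [left],
   st.2.1 ++ [if PySem.List.pyGetD tl ix ' ' ≠ '-' then left else left + 1],
   count)

-- phase 2: select table entries at non-gap columns of from_sequence
def pvBStep2 (fl : List Char) (lefts rights : List Int) (st : List Int × List Int) (ix : Int) :
    List Int × List Int :=
  if PySem.List.pyGetD fl ix ' ' ≠ '-' then
    (st.1 ++ [PySem.List.pyGetD lefts ix 0], st.2 ++ [PySem.List.pyGetD rights ix 0])
  else st

def get_relative_coordinates_alt (to_sequence : String) (from_sequence : String) : List Int × List Int :=
  let tl := to_sequence.toList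
  let fl := from_sequence.toList
  let t1 := (PySem.List.pyRange 0 (PySem.List.len tl) 1).foldl (pvBStep1 tl) ([], [], 0)
  (PySem.List.pyRange 0 (PySem.List.len tl) 1).foldl (pvBStep2 fl t1.1 t1.2.1) ([], [])

-- ===== PRECONDITION & SPEC =====
-- Pre_ excludes exactly the inputs where A raises IndexError: from_sequence shorter
-- than to_sequence (both programs index from_sequence[ix] for ix over range(len(to_sequence))).
def Pre_get_relative_coordinates (to_sequence : String) (from_sequence : String) : Prop :=
  to_sequence.toList.length ≤ from_sequence.toList.length
instance (to_sequence : String) (from_sequence : String) : Decidable (Pre_get_relative_coordinates to_sequence from_sequence) := by unfold Pre_get_relative_coordinates; infer_instance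

def pvWitness_get_relative_coordinates : String × String := ("AB-C", "A-BC")

def Spec_get_relative_coordinates (to_sequence : String) (from_sequence : String) (out : List Int × List Int) : Prop := out = get_relative_coordinates_alt to_sequence from_sequence
instance (to_sequence : String) (from_sequence : String) (out : List Int × List Int) : Decidable (Spec_get_relative_coordinates to_sequence from_sequence out) := by unfold Spec_get_relative_coordinates; infer_instance

-- ===== CLAIM (what is proved, stated in full; the proofs are below) =====
def Claim_equal_get_relative_coordinates : Prop := ∀ (to_sequence : String) (from_sequence : String), Dom_get_relative_coordinates to_sequence from_sequence → Pre_get_relative_coordinates to_sequence from_sequence → Spec_get_relative_coordinates to_sequence from_sequence (get_relative_coordinates to_sequence from_sequence)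

-- ===== LEMMAS AND PROOFS =====

-- number of non-gap characters among the first n characters, as an Int
def pvCnt (tl : List Char) (n : Nat) : Int := ((tl.take n).countP (fun c => c ≠ '-') : Int)

-- the common result on the first n columns
def pvGL (tl fl : List Char) : Nat → List Int
  | 0 => []
  | n+1 => pvGL tl fl n ++ (if fl.getD n ' ' ≠ '-' then [pvCnt tl (n+1) - 1] else [])

def pvGR (tl fl : List Char) : Nat → List Int
  | 0 => []
  | n+1 => pvGR tl fl n ++
      (if fl.getD n ' ' ≠ '-' then
        [if tl.getD n ' ' ≠ '-' then pvCnt tl (n+1) - 1 else pvCnt tl (n+1)]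
      else [])

-- B's tables on the first n columns
def pvL (tl : List Char) : Nat → List Int
  | 0 => []
  | n+1 => pvL tl n ++ [pvCnt tl (n+1) - 1]

def pvR (tl : List Char) : Nat → List Int
  | 0 => []
  | n+1 => pvR tl n ++ [if tl.getD n ' ' ≠ '-' then pvCnt tl (n+1) - 1 else pvCnt tl (n+1)]

theorem pvCnt_succ (tl : List Char) (n : Nat) (h : n < tl.length) :
    pvCnt tl (n+1) = pvCnt tl n + (if tl.getD n ' ' ≠ '-' then 1 else 0) := by
  unfold pvCnt
  rw [List.take_add_one, List.countP_append, List.getElem?_eq_getElem h]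
  simp only [Option.toList_some, List.countP_cons, List.countP_nil, List.getD,
    List.getElem?_eq_getElem h, Option.getD_some]
  split_ifs <;> simp_all

theorem pvL_length (tl : List Char) (n : Nat) : (pvL tl n).length = n := by
  induction n with
  | zero => simp [pvL]
  | succ n ih => simp [pvL, ih]

theorem pvR_length (tl : List Char) (n : Nat) : (pvR tl n).length = n := by
  induction n with
  | zero => simp [pvR]
  | succ n ih => simp [pvR, ih]

theorem pvL_getD (tl : List Char) (k n : Nat) (hk : k < n) :
    (pvL tl n).getD k 0 = pvCnt tl (k+1) - 1 := by
  induction n with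
  | zero => omega
  | succ n ih =>
    rcases Nat.lt_or_ge k n with h | h
    · simp only [pvL, List.getD]
      rw [List.getElem?_append_left (by simpa [pvL_length] using h)]
      simpa [List.getD] using ih h
    · have hk' : k = n := by omega
      subst hk'
      simp only [pvL, List.getD]
      rw [List.getElem?_append_right (by simp [pvL_length])]
      simp [pvL_length]

theorem pvR_getD (tl : List Char) (k n : Nat) (hk : k < n) :
    (pvR tl n).getD k 0 = (if tl.getD k ' ' ≠ '-' then pvCnt tl (k+1) - 1 else pvCnt tl (k+1)) := by
  induction n with
  | zero => omega
  | succ n ih =>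
    rcases Nat.lt_or_ge k n with h | h
    · simp only [pvR, List.getD]
      rw [List.getElem?_append_left (by simpa [pvR_length] using h)]
      simpa [List.getD] using ih h
    · have hk' : k = n := by omega
      subst hk'
      simp only [pvR, List.getD]
      rw [List.getElem?_append_right (by simp [pvR_length])]
      simp [pvR_length]

theorem pvA_loop (tl fl : List Char) (n : Nat) (ht : n ≤ tl.length) (hf : n ≤ fl.length) :
    (PySem.List.pyRange 0 (n : Int) 1).foldl (pvAStep tl fl) (([], []), -1, 0, -1)
      = ((pvGL tl fl n, pvGR tl fl n), pvCnt tl n - 1, pvCnt tl n, pvCnt fl n - 1) := by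
  induction n with
  | zero => simp [PySem.List.pyRange_one_eq_nil, pvGL, pvGR, pvCnt]
  | succ n ih =>
    have hn : n < tl.length := by omega
    have hfn : n < fl.length := by omega
    have hcast : ((n+1 : Nat) : Int) = (n : Int) + 1 := by push_cast; ring
    rw [hcast, PySem.List.pyRange_one_succ_right (by positivity), List.foldl_append,
      ih (by omega) (by omega)]
    have hct := pvCnt_succ tl n hn
    have hcf := pvCnt_succ fl n hfn
    simp only [List.foldl_cons, List.foldl_nil, pvAStep, PySem.List.pyGetD_natCast, pvGL, pvGR]
    by_cases h1 : tl.getD n ' ' = '-' <;> by_cases h2 : fl.getD n ' ' = '-' <;>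
      simp_all

theorem pvB_loop1 (tl : List Char) (n : Nat) (ht : n ≤ tl.length) :
    (PySem.List.pyRange 0 (n : Int) 1).foldl (pvBStep1 tl) ([], [], 0)
      = (pvL tl n, pvR tl n, pvCnt tl n) := by
  induction n with
  | zero => simp [PySem.List.pyRange_one_eq_nil, pvL, pvR, pvCnt]
  | succ n ih =>
    have hn : n < tl.length := by omega
    have hcast : ((n+1 : Nat) : Int) = (n : Int) + 1 := by push_cast; ring
    rw [hcast, PySem.List.pyRange_one_succ_right (by positivity), List.foldl_append,
      ih (by omega)]
    have hct := pvCnt_succ tl n hn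
    simp only [List.foldl_cons, List.foldl_nil, pvBStep1, PySem.List.pyGetD_natCast, pvL, pvR]
    by_cases h1 : tl.getD n ' ' = '-' <;> simp_all

theorem pvB_loop2 (tl fl : List Char) (N n : Nat) (hN : n ≤ N) (hf : n ≤ fl.length) :
    (PySem.List.pyRange 0 (n : Int) 1).foldl (pvBStep2 fl (pvL tl N) (pvR tl N)) ([], [])
      = (pvGL tl fl n, pvGR tl fl n) := by
  induction n with
  | zero => simp [PySem.List.pyRange_one_eq_nil, pvGL, pvGR]
  | succ n ih =>
    have hcast : ((n+1 : Nat) : Int) = (n : Int) + 1 := by push_cast; ring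
    rw [hcast, PySem.List.pyRange_one_succ_right (by positivity), List.foldl_append,
      ih (by omega) (by omega)]
    simp only [List.foldl_cons, List.foldl_nil, pvBStep2, PySem.List.pyGetD_natCast,
      pvGL, pvGR, pvL_getD tl n N (by omega), pvR_getD tl n N (by omega)]
    by_cases h2 : fl.getD n ' ' = '-' <;> simp_all

-- ===== VERDICT (by name: the statement is the Claim_ definition above) =====
theorem get_relative_coordinates_spec : Claim_equal_get_relative_coordinates := by
  intro t f _ hpre
  unfold Spec_get_relative_coordinates
  unfold get_relative_coordinates get_relative_coordinates_alt
  have hpre' : t.toList.length ≤ f.toList.length := hpre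
  simp only [PySem.List.len_eq]
  rw [pvA_loop t.toList f.toList t.toList.length le_rfl hpre',
    pvB_loop1 t.toList t.toList.length le_rfl,
    pvB_loop2 t.toList f.toList t.toList.length t.toList.length le_rfl hpre']
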